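-- pv_equiv track=rewrite | github.com/Saathvik879/INTERN | ultimate_backend.py | generate_career_recommendations
-- ===== SOURCE A (Python) =====
-- from typing import List, Dict, Any, Optional
--
-- def generate_career_recommendations(skills: List[str]) -> List[str]:
--     """Generate career recommendations based on skills"""
--     recommendations = []
--
--     if any(skill in skills for skill in ['React', 'JavaScript', 'HTML', 'CSS']):
--         recommendations.append("Front-end Developer roles match your web development skills")
--     if any(skill in skills for skill in ['Python', 'Django', 'Flask', 'Node.js']):
--         recommendations.append("Backend Developer positions align with your server-side skills")
--     if any(skill in skills for skill in ['Python', 'Machine Learning', 'Pandas']):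
--         recommendations.append("Data Science and AI/ML roles would be a great fit")
--     if any(skill in skills for skill in ['Java', 'Kotlin', 'Swift', 'React Native']):
--         recommendations.append("Mobile App Development opportunities match your skills")
--
--     if not recommendations:
--         recommendations.append("Focus on building more projects to showcase your programming abilities")
--
--     return recommendations
-- ===== SOURCE B (Python) =====
-- _FRONT = {'React', 'JavaScript', 'HTML', 'CSS'}
-- _BACK = {'Python', 'Django', 'Flask', 'Node.js'}
-- _DATA = {'Python', 'Machine Learning', 'Pandas'}
-- _MOBILE = {'Java', 'Kotlin', 'Swift', 'React Native'}
--
--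
-- def generate_career_recommendations(skills):
--     """Generate career recommendations based on skills (single pass with flags)."""
--     fe = be = ds = mo = False
--     for s in skills:
--         fe = fe or s in _FRONT
--         be = be or s in _BACK
--         ds = ds or s in _DATA
--         mo = mo or s in _MOBILE
--     out = []
--     if fe:
--         out.append("Front-end Developer roles match your web development skills")
--     if be:
--         out.append("Backend Developer positions align with your server-side skills")
--     if ds:
--         out.append("Data Science and AI/ML roles would be a great fit")
--     if mo:
--         out.append("Mobile App Development opportunities match your skills")
--     if not out:
--         out.append("Focus on building more projects to showcase your programming abilities")
--     return out
-- ===== Notes on version B (the rewrite author's own statement) =====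
-- stated objective: alternative
-- what changed: A scans the whole skills list once per rule via any(...); B makes a single pass over the skills, maintaining one boolean flag per category against constant keyword sets, then emits the messages from the flags.
import Mathlib
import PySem

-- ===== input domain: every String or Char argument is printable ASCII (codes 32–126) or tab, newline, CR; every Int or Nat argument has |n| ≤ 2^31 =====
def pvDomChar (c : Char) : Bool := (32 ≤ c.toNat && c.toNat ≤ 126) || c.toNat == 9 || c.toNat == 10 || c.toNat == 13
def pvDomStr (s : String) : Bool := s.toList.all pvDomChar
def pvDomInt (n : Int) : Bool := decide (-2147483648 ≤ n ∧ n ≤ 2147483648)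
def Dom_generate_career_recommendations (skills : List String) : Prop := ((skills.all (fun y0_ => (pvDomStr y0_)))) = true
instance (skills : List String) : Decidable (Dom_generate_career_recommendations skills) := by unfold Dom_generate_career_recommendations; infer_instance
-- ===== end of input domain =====

-- B replaces A's four any()-scans of the skills list with one pass over skills keeping four boolean flags (alternative decomposition).


-- ===== PORT A =====
def generate_career_recommendations (skills : List String) : List String :=
  let recommendations : List String := []
  let recommendations :=
    if (["React", "JavaScript", "HTML", "CSS"].any (fun skill => skills.contains skill)) then
      recommendations ++ ["Front-end Developer roles match your web development skills"]
    else recommendations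
  let recommendations :=
    if (["Python", "Django", "Flask", "Node.js"].any (fun skill => skills.contains skill)) then
      recommendations ++ ["Backend Developer positions align with your server-side skills"]
    else recommendations
  let recommendations :=
    if (["Python", "Machine Learning", "Pandas"].any (fun skill => skills.contains skill)) then
      recommendations ++ ["Data Science and AI/ML roles would be a great fit"]
    else recommendations
  let recommendations :=
    if (["Java", "Kotlin", "Swift", "React Native"].any (fun skill => skills.contains skill)) then
      recommendations ++ ["Mobile App Development opportunities match your skills"]
    else recommendations
  if recommendations.isEmpty then
    recommendations ++ ["Focus on building more projects to showcase your programming abilities"]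
  else recommendations

-- ===== PORT B =====
def pvFront : PySem.Set String := PySem.Set.ofList ["React", "JavaScript", "HTML", "CSS"]
def pvBack : PySem.Set String := PySem.Set.ofList ["Python", "Django", "Flask", "Node.js"]
def pvData : PySem.Set String := PySem.Set.ofList ["Python", "Machine Learning", "Pandas"]
def pvMobile : PySem.Set String := PySem.Set.ofList ["Java", "Kotlin", "Swift", "React Native"]

-- one pass over skills, updating the four flags exactly as Source B's loop body does
def pvStep (st : Bool × Bool × Bool × Bool) (s : String) : Bool × Bool × Bool × Bool :=
  (st.1 || pvFront.contains s,
   st.2.1 || pvBack.contains s,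
   st.2.2.1 || pvData.contains s,
   st.2.2.2 || pvMobile.contains s)

def generate_career_recommendations_alt (skills : List String) : List String :=
  let flags := skills.foldl pvStep (false, false, false, false)
  let out : List String := []
  let out := if flags.1 then out ++ ["Front-end Developer roles match your web development skills"] else out
  let out := if flags.2.1 then out ++ ["Backend Developer positions align with your server-side skills"] else out
  let out := if flags.2.2.1 then out ++ ["Data Science and AI/ML roles would be a great fit"] else out
  let out := if flags.2.2.2 then out ++ ["Mobile App Development opportunities match your skills"] else out
  if out.isEmpty then
    out ++ ["Focus on building more projects to showcase your programming abilities"]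
  else out

-- ===== PRECONDITION & SPEC =====
def Spec_generate_career_recommendations (skills : List String) (out : List String) : Prop := out = generate_career_recommendations_alt skills
instance (skills : List String) (out : List String) : Decidable (Spec_generate_career_recommendations skills out) := by unfold Spec_generate_career_recommendations; infer_instance

-- ===== CLAIM (what is proved, stated in full; the proofs are below) =====
def Claim_equal_generate_career_recommendations : Prop := ∀ (skills : List String), Dom_generate_career_recommendations skills → Spec_generate_career_recommendations skills (generate_career_recommendations skills)

-- ===== LEMMAS AND PROOFS =====

-- the fold computes, in each component, "some skill lies in that keyword set"
theorem pvFold_eq (skills : List String) (st : Bool × Bool × Bool × Bool) :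
    skills.foldl pvStep st =
      (st.1 || skills.any (fun s => pvFront.contains s),
       st.2.1 || skills.any (fun s => pvBack.contains s),
       st.2.2.1 || skills.any (fun s => pvData.contains s),
       st.2.2.2 || skills.any (fun s => pvMobile.contains s)) := by
  induction skills generalizing st with
  | nil => simp
  | cons x xs ih =>
    simp only [List.foldl_cons, ih, List.any_cons, pvStep]
    simp [Bool.or_assoc]

-- "some keyword is a skill" = "some skill is a keyword"
theorem pvAny_comm (kws skills : List String) :
    (kws.any (fun kw => skills.contains kw)) = (skills.any (fun s => kws.contains s)) := by
  simp only [List.any_eq, List.contains_iff_mem, decide_eq_decide]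
  constructor <;> rintro ⟨x, hx, hy⟩ <;> exact ⟨x, hy, hx⟩

-- ===== VERDICT (by name: the statement is the Claim_ definition above) =====
theorem generate_career_recommendations_spec : Claim_equal_generate_career_recommendations := by
  intro skills _
  show _ = _
  simp only [generate_career_recommendations, generate_career_recommendations_alt, pvFold_eq,
    Bool.false_or]
  rw [pvAny_comm ["React", "JavaScript", "HTML", "CSS"],
      pvAny_comm ["Python", "Django", "Flask", "Node.js"],
      pvAny_comm ["Python", "Machine Learning", "Pandas"],
      pvAny_comm ["Java", "Kotlin", "Swift", "React Native"]]
  rfl
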